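-- pv_equiv track=rewrite | github.com/simonavrillon/MUedit2 | python/src/muedit/services/editing_service.py | _pad_grid_names
-- ===== SOURCE A (Python) =====
-- def _pad_grid_names(names: list[str], expected_count: int, fallback: list[str]) -> list[str]:
--     out = [str(x).strip() for x in (names or []) if str(x).strip()]
--     if not out:
--         out = [str(x).strip() for x in (fallback or []) if str(x).strip()]
--     target_count = max(int(expected_count or 0), len(out))
--     while len(out) < target_count:
--         fill = out[-1] if out else f"Grid {len(out) + 1}"
--         out.append(fill)
--     return out
-- ===== SOURCE B (Python) =====
-- def _pad_grid_names(names: list[str], expected_count: int, fallback: list[str]) -> list[str]: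
--     def cleaned(src):
--         for x in src or []:
--             s = str(x).strip()
--             if s:
--                 yield s
--     out = list(cleaned(names)) or list(cleaned(fallback))
--     n = len(out)
--     target = max(int(expected_count or 0), n)
--     return [out[min(i, n - 1)] if n else "Grid 1" for i in range(target)]
-- ===== Notes on version B (the rewrite author's own statement) =====
-- stated objective: alternative
-- what changed: Builds the result positionally: one comprehension over range(target) where index i looks up out[min(i, n-1)] (or 'Grid 1' if nothing survives cleaning), instead of A's while-loop that mutates and appends out[-1] until the target length is reached.
import Mathlib
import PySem

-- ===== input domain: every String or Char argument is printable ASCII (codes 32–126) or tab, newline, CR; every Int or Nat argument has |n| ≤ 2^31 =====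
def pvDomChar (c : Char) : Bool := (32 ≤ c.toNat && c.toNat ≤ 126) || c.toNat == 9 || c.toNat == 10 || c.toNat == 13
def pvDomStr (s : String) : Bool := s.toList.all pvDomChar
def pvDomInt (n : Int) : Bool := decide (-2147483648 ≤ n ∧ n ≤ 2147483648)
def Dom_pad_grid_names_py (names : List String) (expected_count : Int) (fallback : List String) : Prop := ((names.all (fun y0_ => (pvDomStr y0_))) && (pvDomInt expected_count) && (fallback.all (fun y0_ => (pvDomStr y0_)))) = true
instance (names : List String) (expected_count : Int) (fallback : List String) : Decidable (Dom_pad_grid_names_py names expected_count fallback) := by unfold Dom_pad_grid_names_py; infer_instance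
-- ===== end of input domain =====

-- B builds the output positionally (clamped-index lookup over range(target)) instead of A's mutate-and-append while-loop (objective: alternative).

-- ===== PORT A =====
-- A's cleaning comprehension: strip each entry, drop blanks
def pvCleanA (xs : List String) : List String :=
  (xs.map (fun x => PySem.Str.strip x)).filter (fun s => s ≠ "")

-- A's while-loop: fuel = target_count - len(out); each step appends out[-1] (or "Grid {len+1}" if empty)
def pvPadLoop : Nat → List String → List String
  | 0, out => out
  | n+1, out =>
      pvPadLoop n (out ++ [match out.getLast? with
                           | some v => v
                           | none => "Grid " ++ PySem.Int.toStr ((out.length : Int) + 1)])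

def pad_grid_names_py (names : List String) (expected_count : Int) (fallback : List String) : List String :=
  let out := pvCleanA names
  let out := if out = [] then pvCleanA fallback else out
  let target := max expected_count (out.length : Int)
  pvPadLoop (target - (out.length : Int)).toNat out

-- ===== PORT B =====
-- B's generator `cleaned`: yields stripped nonblank entries (ported as flatMap over the source)
def pvCleanB (xs : List String) : List String :=
  xs.flatMap (fun x => let s := PySem.Str.strip x; if s ≠ "" then [s] else [])

def pad_grid_names_py_alt (names : List String) (expected_count : Int) (fallback : List String) : List String :=
  let out := pvCleanB names
  let out := if out = [] then pvCleanB fallback else out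
  let n := out.length
  let target := max expected_count (n : Int)
  (List.range target.toNat).map (fun i => if n ≠ 0 then out.getD (min i (n - 1)) "" else "Grid 1")

-- ===== PRECONDITION & SPEC =====
def Spec_pad_grid_names_py (names : List String) (expected_count : Int) (fallback : List String) (out : List String) : Prop := out = pad_grid_names_py_alt names expected_count fallback
instance (names : List String) (expected_count : Int) (fallback : List String) (out : List String) : Decidable (Spec_pad_grid_names_py names expected_count fallback out) := by unfold Spec_pad_grid_names_py; infer_instance

-- ===== CLAIM (what is proved, stated in full; the proofs are below) =====
def Claim_equal_pad_grid_names_py : Prop := ∀ (names : List String) (expected_count : Int) (fallback : List String), Dom_pad_grid_names_py names expected_count fallback → Spec_pad_grid_names_py names expected_count fallback (pad_grid_names_py names expected_count fallback)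

-- ===== LEMMAS AND PROOFS =====
theorem pvCleanA_eq_B (xs : List String) : pvCleanA xs = pvCleanB xs := by
  induction xs with
  | nil => rfl
  | cons x xs ih =>
      simp only [pvCleanA, pvCleanB, List.map_cons, List.filter_cons, List.flatMap_cons] at *
      by_cases h : PySem.Str.strip x = ""
      · simp [h]; simpa using ih
      · simp [h]; simpa using ih

theorem pvPadLoop_nonempty (n : Nat) (out : List String) (l : String) (h : out.getLast? = some l) :
    pvPadLoop n out = out ++ List.replicate n l := by
  induction n generalizing out with
  | zero => simp [pvPadLoop]
  | succ n ih =>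
      have h2 : (out ++ [l]).getLast? = some l := by simp
      simp only [pvPadLoop, h]
      rw [ih (out ++ [l]) h2]
      simp [List.replicate_succ]

theorem pvPadLoop_nil (n : Nat) : pvPadLoop n [] = List.replicate n "Grid 1" := by
  cases n with
  | zero => simp [pvPadLoop]
  | succ n =>
      have e : pvPadLoop (n+1) [] = pvPadLoop n ["Grid 1"] := by
        simp only [pvPadLoop, List.getLast?_nil, List.nil_append, List.length_nil,
          Int.natCast_zero, Int.zero_add]
        rw [show "Grid " ++ PySem.Int.toStr 1 = "Grid 1" from by decide]
      rw [e, pvPadLoop_nonempty n ["Grid 1"] "Grid 1" (by simp)]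
      simp [List.replicate_succ]

-- the positional construction over a nonempty list equals append-replicate of the last element
theorem map_clamped (out : List String) (hne : out ≠ []) (t : Nat) (ht : out.length ≤ t) :
    (List.range t).map (fun i => if out.length ≠ 0 then out.getD (min i (out.length - 1)) "" else "Grid 1")
      = out ++ List.replicate (t - out.length) (out.getLast hne) := by
  have hn : out.length ≠ 0 := fun h => hne (List.length_eq_zero_iff.mp h)
  apply List.ext_getElem
  · simp; omega
  · intro i h1 h2
    have hi : i < t := by simpa using h1
    simp only [List.getElem_map, List.getElem_range, if_pos hn]
    by_cases hc : i < out.length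
    · have : min i (out.length - 1) = i := by omega
      rw [this, List.getD_eq_getElem _ _ hc, List.getElem_append_left hc]
    · have hm : min i (out.length - 1) = out.length - 1 := by omega
      have hl : out.length - 1 < out.length := by omega
      rw [hm, List.getD_eq_getElem _ _ hl]
      rw [List.getElem_append_right (by omega)]
      simp only [List.getElem_replicate]
      exact (List.getLast_eq_getElem hne).symm
  
theorem pv_core (out : List String) (ec : Int) :
    pvPadLoop (max ec (out.length : Int) - (out.length : Int)).toNat out =
    (List.range (max ec (out.length : Int)).toNat).map
      (fun i => if out.length ≠ 0 then out.getD (min i (out.length - 1)) "" else "Grid 1") := by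
  by_cases hne : out = []
  · subst hne
    simp only [List.length_nil, Int.natCast_zero, Int.sub_zero, pvPadLoop_nil]
    apply List.ext_getElem <;> simp
  · rw [pvPadLoop_nonempty _ _ _ (List.getLast?_eq_some_getLast hne),
        map_clamped out hne _ (by omega),
        show ((max ec (out.length : Int)).toNat - out.length) = (max ec (out.length : Int) - (out.length : Int)).toNat from by omega]

-- ===== VERDICT (by name: the statement is the Claim_ definition above) =====
theorem pad_grid_names_py_spec : Claim_equal_pad_grid_names_py := by
  intro names ec fallback _
  unfold Spec_pad_grid_names_py pad_grid_names_py pad_grid_names_py_alt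
  simp only [← pvCleanA_eq_B]
  exact pv_core (if pvCleanA names = [] then pvCleanA fallback else pvCleanA names) ec
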